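-- pv_equiv track=rewrite | github.com/varenik17/TSP-team | tsp/helpers.py | single_tour_check
-- ===== SOURCE A (Python) =====
-- from typing import List, Tuple, Set, Optional
--
-- Edge = Tuple[int, int]
--
-- def adjacency_list(n: int, edges: Set[Edge]) -> List[List[int]]:
--     adj = [[] for _ in range(n)]
--     for a, b in edges:
--         adj[a].append(b)
--         adj[b].append(a)
--     return adj
--
-- def single_tour_check(n: int, edges: Set[Edge]) -> bool:
--     if len(edges) != n:
--         return False
--
--     adj = adjacency_list(n, edges)
--     for v in range(n):
--         if len(adj[v]) != 2:
--             return False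
--
--     seen = set()
--     stack = [0]
--     while stack:
--         v = stack.pop()
--         if v in seen:
--             continue
--         seen.add(v)
--         stack.extend(adj[v])
--
--     return len(seen) == n
-- ===== SOURCE B (Python) =====
-- def single_tour_check(n, edges):
--     if len(edges) != n:
--         return False
--     deg = [0] * n
--     for a, b in edges:
--         deg[a] += 1
--         deg[b] += 1
--     if any(d != 2 for d in deg):
--         return False
--     reach = [False] * n
--     reach[0] = True
--     changed = True
--     while changed:
--         changed = False
--         for a, b in edges:
--             if reach[a] != reach[b]:
--                 reach[a] = reach[b] = True
--                 changed = True
--     return all(reach)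
-- ===== Notes on version B (the rewrite author's own statement) =====
-- stated objective: alternative
-- what changed: Replaces A's adjacency-list construction plus explicit-stack DFS with a seen-set by a degree-count array and an in-place boolean label-propagation fixpoint iterated over the edge list until no cell changes (no adjacency lists, no stack, no visited set).
-- outside the precondition, e.g. on single_tour_check(2, {(1, 0), (0, -1)}): A returns False, B returns True; on single_tour_check(0, set()): A raises IndexError, B raises IndexError; on single_tour_check(1, {(0, 5)}): A raises IndexError, B raises IndexError
import Mathlib
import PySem

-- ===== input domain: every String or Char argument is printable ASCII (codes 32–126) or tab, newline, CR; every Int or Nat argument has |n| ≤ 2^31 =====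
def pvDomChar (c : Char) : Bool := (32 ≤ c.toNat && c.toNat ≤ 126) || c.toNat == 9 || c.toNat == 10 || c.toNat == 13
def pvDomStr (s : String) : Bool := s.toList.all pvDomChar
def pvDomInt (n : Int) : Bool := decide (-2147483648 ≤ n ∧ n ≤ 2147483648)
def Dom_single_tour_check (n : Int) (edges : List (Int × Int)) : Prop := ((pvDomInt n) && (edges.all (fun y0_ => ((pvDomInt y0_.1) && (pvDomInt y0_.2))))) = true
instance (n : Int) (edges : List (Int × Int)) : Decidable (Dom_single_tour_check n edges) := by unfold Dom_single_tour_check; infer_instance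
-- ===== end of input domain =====

-- B replaces A's adjacency-list build + explicit-stack DFS by a degree-count array and a
-- boolean label-propagation fixpoint over the edge list (objective: alternative, not faster).

-- ===== PORT A =====

-- helper lemmas cited only by pvDfs's termination argument
theorem pv_mem_flatten_of_mem_pyGetD {adj : List (List Int)} {v x : Int}
    (hx : x ∈ PySem.List.pyGetD adj v []) : x ∈ adj.flatten := by
  unfold PySem.List.pyGetD at hx
  cases h : PySem.List.pyGet? adj v with
  | none => simp [h] at hx
  | some l =>
      rw [h] at hx
      simp only [Option.getD_some] at hx
      exact List.mem_flatten.mpr ⟨l, PySem.List.mem_of_pyGet?_eq_some adj h, hx⟩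

theorem pv_len_le_flatten {adj : List (List Int)} {l : List Int} (h : l ∈ adj) :
    l.length ≤ adj.flatten.length := by
  induction adj with
  | nil => simp at h
  | cons a t ih =>
      rcases List.mem_cons.mp h with h | h
      · subst h
        rw [List.flatten_cons, List.length_append]
        omega
      · have h2 := ih h
        rw [List.flatten_cons, List.length_append]
        omega

theorem pv_pyGetD_len_le (adj : List (List Int)) (v : Int) :
    (PySem.List.pyGetD adj v []).length ≤ adj.flatten.length := by
  unfold PySem.List.pyGetD
  cases h : PySem.List.pyGet? adj v with
  | none => simp
  | some l => simpa using pv_len_le_flatten (PySem.List.mem_of_pyGet?_eq_some adj h)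

theorem pv_filter_add_lt {seen : PySem.Set Int} {v : Int} {L : List Int}
    (hvL : v ∈ L) (hv : ¬ PySem.Set.contains seen v = true) :
    (L.filter (fun y => !(PySem.Set.contains (PySem.Set.add seen v) y))).length
      < (L.filter (fun y => !(PySem.Set.contains seen y))).length := by
  have hpt : (fun y : Int => (!(PySem.Set.contains (PySem.Set.add seen v) y)))
      = fun y : Int => ((!(y == v)) && (!(PySem.Set.contains seen y))) := by
    funext y
    have : PySem.Set.contains (PySem.Set.add seen v) y
        = (PySem.Set.contains seen y || y == v) := by
      rw [Bool.eq_iff_iff]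
      simp [PySem.Set.mem_add]
    rw [this]
    cases PySem.Set.contains seen y <;> cases h : (y == v) <;> simp
  rw [hpt, ← List.filter_filter]
  refine List.length_filter_lt_length_iff_exists.mpr ⟨v, ?_, ?_⟩
  · rw [List.mem_filter]
    refine ⟨hvL, ?_⟩
    simp
    simpa using hv
  · simp

theorem pv_dfs_dec {adj : List (List Int)} {seen : PySem.Set Int} {v : Int}
    (rest nbrs : List Int)
    (hvmem : v ∈ (0 : Int) :: adj.flatten)
    (hv : ¬ PySem.Set.contains seen v = true)
    (hnb : nbrs.length ≤ adj.flatten.length) :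
    ((((0 : Int) :: adj.flatten).filter
        (fun y => !(PySem.Set.contains (PySem.Set.add seen v) y))).length)
          * (adj.flatten.length + 2) + (nbrs.reverse ++ rest).length
      < ((((0 : Int) :: adj.flatten).filter
          (fun y => !(PySem.Set.contains seen y))).length)
            * (adj.flatten.length + 2) + (v :: rest).length := by
  have hlt := pv_filter_add_lt (seen := seen) hvmem hv
  set K := adj.flatten.length + 2 with hK
  set l1 := (((0 : Int) :: adj.flatten).filter
      (fun y => !(PySem.Set.contains (PySem.Set.add seen v) y))).length
  set l2 := (((0 : Int) :: adj.flatten).filter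
      (fun y => !(PySem.Set.contains seen y))).length
  have hmul : (l1 + 1) * K ≤ l2 * K := Nat.mul_le_mul_right K hlt
  have hexp : (l1 + 1) * K = l1 * K + K := by ring
  simp only [List.length_append, List.length_reverse, List.length_cons]
  omega

-- adj[a].append(b)  (Python list indexing: negative index wraps, out of range = IndexError — unreachable under Pre_)
def pvAppendAt (adj : List (List Int)) (i : Int) (x : Int) : List (List Int) :=
  match PySem.List.pyGet? adj i with
  | some l => PySem.List.pySetD adj i (l ++ [x])
  | none => adj

def adjacency_list (n : Int) (edges : List (Int × Int)) : List (List Int) :=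
  edges.foldl (fun adj e => pvAppendAt (pvAppendAt adj e.1 e.2) e.2 e.1)
    (List.replicate n.toNat [])

-- A's DFS loop; the Lean stack keeps the Python stack reversed (head = top), so
-- 'stack.extend(adj[v])' followed by pops from the END is 'adj[v].reverse ++ rest'.
-- The hypothesis argument hs only justifies termination; it never alters the computation.
def pvDfs (adj : List (List Int)) (seen : PySem.Set Int) (stack : List Int)
    (hs : ∀ x ∈ stack, x ∈ (0 : Int) :: adj.flatten) : PySem.Set Int :=
  match stack, hs with
  | [], _ => seen
  | v :: rest, hs =>
    if hv : PySem.Set.contains seen v then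
      pvDfs adj seen rest (fun x hx => hs x (List.mem_cons_of_mem _ hx))
    else
      pvDfs adj (PySem.Set.add seen v)
        ((PySem.List.pyGetD adj v []).reverse ++ rest)
        (fun x hx => by
          rcases List.mem_append.mp hx with h | h
          · exact List.mem_cons_of_mem _ (pv_mem_flatten_of_mem_pyGetD (List.mem_reverse.mp h))
          · exact hs x (List.mem_cons_of_mem _ h))
  termination_by
    (((0 : Int) :: adj.flatten).filter (fun y => !(PySem.Set.contains seen y))).length
      * (adj.flatten.length + 2) + stack.length
  decreasing_by
  · simp only [List.length_cons]; omega
  · exact pv_dfs_dec rest _ (hs v (List.mem_cons_self)) hv (pv_pyGetD_len_le adj v)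

def single_tour_check (n : Int) (edges : List (Int × Int)) : Bool :=
  if (edges.length : Int) ≠ n then false
  else
    let adj := adjacency_list n edges
    if ¬ ((PySem.List.pyRange 0 n 1).all
        (fun v => (PySem.List.pyGetD adj v []).length == 2)) then false
    else
      let seen := pvDfs adj PySem.Set.empty [0] (by intro x hx; simp at hx; simp [hx])
      ((PySem.Set.len seen : Int) == n)

-- ===== PORT B =====

-- deg[i] += 1  (same Python indexing semantics as pvAppendAt)
def pvIncAt (d : List Int) (i : Int) : List Int :=
  match PySem.List.pyGet? d i with
  | some x => PySem.List.pySetD d i (x + 1)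
  | none => d

def pvDegrees (n : Int) (edges : List (Int × Int)) : List Int :=
  edges.foldl (fun d e => pvIncAt (pvIncAt d e.1) e.2) (List.replicate n.toNat 0)

-- one 'for a, b in edges' pass; second component is the 'changed' flag
def pvPass (edges : List (Int × Int)) (reach : List Bool) : List Bool × Bool :=
  edges.foldl (fun st e =>
    if PySem.List.pyGetD st.1 e.1 false ≠ PySem.List.pyGetD st.1 e.2 false then
      (PySem.List.pySetD (PySem.List.pySetD st.1 e.1 true) e.2 true, true)
    else st) (reach, false)

-- the 'while changed' loop; fuel is a totality guard only — n+1 passes are proved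
-- sufficient under Pre_ (each changed pass strictly increases the number of true cells)
def pvProp (edges : List (Int × Int)) (reach : List Bool) (fuel : Nat) : List Bool :=
  match fuel with
  | 0 => reach
  | fuel + 1 =>
    let st := pvPass edges reach
    if st.2 then pvProp edges st.1 fuel else st.1

def single_tour_check_alt (n : Int) (edges : List (Int × Int)) : Bool :=
  if (edges.length : Int) ≠ n then false
  else
    let deg := pvDegrees n edges
    if ¬ (deg.all (fun d => d == 2)) then false
    else
      let reach0 := PySem.List.pySetD (List.replicate n.toNat false) 0 true
      (pvProp edges reach0 (n.toNat + 1)).all (fun b => b)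

-- ===== PRECONDITION & SPEC =====

-- Pre_ excludes, only when len(edges) == n (otherwise both sides return False untouched),
-- the inputs n == 0 and edge lists with an endpoint outside [0, n): endpoints < -n or ≥ n
-- (and n == 0) make A raise IndexError, while negative in-range endpoints hit Python's
-- negative-index wraparound, so A's 'seen' counts an alias label and its vertex as two
-- distinct vertices — an accident of A's list indexing, not a specified behaviour.
def Pre_single_tour_check (n : Int) (edges : List (Int × Int)) : Prop :=
  (edges.length : Int) = n →
    (0 < n ∧ ∀ e ∈ edges, 0 ≤ e.1 ∧ e.1 < n ∧ 0 ≤ e.2 ∧ e.2 < n)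

instance (n : Int) (edges : List (Int × Int)) : Decidable (Pre_single_tour_check n edges) := by
  unfold Pre_single_tour_check; infer_instance

def pvWitness_single_tour_check : Int × (List (Int × Int)) := (3, [(0, 1), (1, 2), (2, 0)])

def Spec_single_tour_check (n : Int) (edges : List (Int × Int)) (out : Bool) : Prop :=
  out = single_tour_check_alt n edges
instance (n : Int) (edges : List (Int × Int)) (out : Bool) :
    Decidable (Spec_single_tour_check n edges out) := by
  unfold Spec_single_tour_check; infer_instance

-- ===== CLAIM (what is proved, stated in full; the proofs are below) =====
def Claim_equal_single_tour_check : Prop :=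
  ∀ (n : Int) (edges : List (Int × Int)), Dom_single_tour_check n edges →
    Pre_single_tour_check n edges →
    Spec_single_tour_check n edges (single_tour_check n edges)


-- ===== LEMMAS AND PROOFS =====

-- the undirected edge relation of the input, and reachability from vertex 0
def pvRel (edges : List (Int × Int)) (x y : Int) : Prop :=
  (x, y) ∈ edges ∨ (y, x) ∈ edges

def pvReach (edges : List (Int × Int)) (x : Int) : Prop :=
  Relation.ReflTransGen (pvRel edges) 0 x

-- the neighbour relation read off an adjacency structure
def pvN (adj : List (List Int)) (u x : Int) : Prop := x ∈ PySem.List.pyGetD adj u []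

def pvInR (n : Int) (edges : List (Int × Int)) : Prop :=
  ∀ e ∈ edges, 0 ≤ e.1 ∧ e.1 < n ∧ 0 ≤ e.2 ∧ e.2 < n

theorem pv_pyGetD_toNat {α : Type} (xs : List α) (i : Int) (d : α)
    (h0 : 0 ≤ i) (h1 : i < (xs.length : Int)) :
    PySem.List.pyGetD xs i d = xs.getD i.toNat d := by
  rw [PySem.List.pyGetD_eq_getElem xs d h0 h1, List.getD_eq_getElem _ _ (by omega)]

-- ---- adjacency construction ----

theorem pvAppendAt_length (adj : List (List Int)) (i x : Int) :
    (pvAppendAt adj i x).length = adj.length := by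
  unfold pvAppendAt
  cases h : PySem.List.pyGet? adj i
  · rfl
  · exact PySem.List.length_pySetD adj i _

theorem getD_pvAppendAt (adj : List (List Int)) (i x : Int) (v : Nat)
    (h0 : 0 ≤ i) (h1 : i < (adj.length : Int)) (hv : v < adj.length) :
    (pvAppendAt adj i x).getD v []
      = if (v : Int) = i then adj.getD v [] ++ [x] else adj.getD v [] := by
  unfold pvAppendAt
  rw [PySem.List.pyGet?_eq_some_getElem adj h0 h1]
  simp only []
  rw [PySem.List.pySetD_of_nonneg adj _ h0]
  have hlen : v < (adj.set i.toNat (adj[i.toNat] ++ [x])).length := by simp [hv]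
  rw [List.getD_eq_getElem _ _ hlen, List.getElem_set]
  by_cases hvi : (v : Int) = i
  · have : i.toNat = v := by omega
    simp [this, hvi, List.getElem?_eq_getElem hv]
  · have : ¬ (i.toNat = v) := by omega
    simp [this, hvi, List.getElem?_eq_getElem hv]

theorem adj_fold_spec (edges : List (Int × Int)) :
    ∀ (acc : List (List Int)),
      (∀ e ∈ edges, 0 ≤ e.1 ∧ e.1 < (acc.length : Int) ∧ 0 ≤ e.2 ∧ e.2 < (acc.length : Int)) →
      ((edges.foldl (fun adj e => pvAppendAt (pvAppendAt adj e.1 e.2) e.2 e.1) acc).length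
          = acc.length) ∧
      (∀ (v : Nat), v < acc.length → ∀ x : Int,
        (x ∈ (edges.foldl (fun adj e => pvAppendAt (pvAppendAt adj e.1 e.2) e.2 e.1) acc).getD v []
          ↔ x ∈ acc.getD v [] ∨ ((↑v, x) ∈ edges ∨ (x, ↑v) ∈ edges))) := by
  induction edges with
  | nil => intro acc _; exact ⟨rfl, fun v hv x => by simp⟩
  | cons e t ih =>
      intro acc h
      have he := h e (List.mem_cons_self)
      set acc' := pvAppendAt (pvAppendAt acc e.1 e.2) e.2 e.1 with hacc'
      have hlen' : acc'.length = acc.length := by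
        rw [hacc', pvAppendAt_length, pvAppendAt_length]
      have ht : ∀ e' ∈ t, 0 ≤ e'.1 ∧ e'.1 < (acc'.length : Int) ∧ 0 ≤ e'.2 ∧ e'.2 < (acc'.length : Int) := by
        intro e' he'
        rw [hlen']
        exact h e' (List.mem_cons_of_mem _ he')
      obtain ⟨ihlen, ihmem⟩ := ih acc' ht
      simp only [List.foldl_cons]
      refine ⟨by rw [ihlen, hlen'], ?_⟩
      intro v hv x
      have hv' : v < acc'.length := by omega
      have hmem' : x ∈ acc'.getD v [] ↔
          x ∈ acc.getD v [] ∨ (↑v = e.1 ∧ x = e.2) ∨ (↑v = e.2 ∧ x = e.1) := by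
        rw [hacc']
        rw [getD_pvAppendAt _ e.2 e.1 v he.2.2.1 (by rw [pvAppendAt_length]; exact he.2.2.2) (by rw [pvAppendAt_length]; exact hv)]
        rw [getD_pvAppendAt _ e.1 e.2 v he.1 he.2.1 hv]
        split <;> split <;> simp_all
      rw [ihmem v hv' x, hmem']
      simp only [List.mem_cons, Prod.ext_iff]
      tauto

theorem adjacency_length (n : Int) (edges : List (Int × Int)) (hInR : pvInR n edges)
    (hn : n = (edges.length : Int)) :
    (adjacency_list n edges).length = n.toNat := by
  have h0 : (0:Int) ≤ n := by rw [hn]; positivity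
  have hcast : ((List.replicate n.toNat ([] : List Int)).length : Int) = n := by
    simp; omega
  exact (adj_fold_spec edges _ (fun e he => by rw [hcast]; exact hInR e he)).1.trans
    (by simp)

theorem adjacency_mem (n : Int) (edges : List (Int × Int)) (hInR : pvInR n edges)
    (hn : n = (edges.length : Int)) (v : Nat) (hv : v < n.toNat) (x : Int) :
    x ∈ (adjacency_list n edges).getD v [] ↔ pvRel edges (↑v) x := by
  have h0 : (0:Int) ≤ n := by rw [hn]; positivity
  have hcast : ((List.replicate n.toNat ([] : List Int)).length : Int) = n := by
    simp; omega
  have := (adj_fold_spec edges (List.replicate n.toNat ([] : List Int))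
    (fun e he => by rw [hcast]; exact hInR e he)).2 v (by simpa using hv) x
  unfold adjacency_list pvRel
  rw [this]
  simp

-- ---- DFS ----

theorem pvDfs_mono (adj : List (List Int)) (seen : PySem.Set Int) (stack : List Int)
    (hs : ∀ x ∈ stack, x ∈ (0 : Int) :: adj.flatten) (x : Int)
    (hx : x ∈ seen ∨ x ∈ stack) : x ∈ pvDfs adj seen stack hs := by
  induction seen, stack, hs using pvDfs.induct adj with
  | case1 seen hs => rw [pvDfs]; simpa using hx
  | case2 seen v rest hs hv harg ih =>
      rw [pvDfs]; simp only [hv, dif_pos]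
      apply ih
      rcases hx with hx | hx
      · exact Or.inl hx
      · rcases List.mem_cons.mp hx with rfl | hx
        · exact Or.inl (by simpa using hv)
        · exact Or.inr hx
  | case3 seen v rest hs hv harg ih =>
      rw [pvDfs]; simp only [hv]
      apply ih
      rcases hx with hx | hx
      · exact Or.inl (by rw [PySem.Set.mem_add]; exact Or.inl hx)
      · rcases List.mem_cons.mp hx with rfl | hx
        · exact Or.inl (by rw [PySem.Set.mem_add]; exact Or.inr rfl)
        · exact Or.inr (List.mem_append.mpr (Or.inr hx))

theorem pvDfs_closed (adj : List (List Int)) (seen : PySem.Set Int) (stack : List Int)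
    (hs : ∀ x ∈ stack, x ∈ (0 : Int) :: adj.flatten)
    (hinv : ∀ u x : Int, u ∈ seen → pvN adj u x → x ∈ seen ∨ x ∈ stack) :
    ∀ u x : Int, u ∈ pvDfs adj seen stack hs → pvN adj u x → x ∈ pvDfs adj seen stack hs := by
  induction seen, stack, hs using pvDfs.induct adj with
  | case1 seen hs =>
      intro u x hu hux
      rw [pvDfs] at hu ⊢
      rcases hinv u x hu hux with h | h
      · exact h
      · simp at h
  | case2 seen v rest hs hv harg ih =>
      intro u x hu hux
      rw [pvDfs] at hu ⊢
      simp only [hv, dif_pos] at hu ⊢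
      refine ih ?_ u x hu hux
      intro u' x' hu' hux'
      rcases hinv u' x' hu' hux' with h | h
      · exact Or.inl h
      · rcases List.mem_cons.mp h with rfl | h
        · exact Or.inl (by simpa using hv)
        · exact Or.inr h
  | case3 seen v rest hs hv harg ih =>
      intro u x hu hux
      rw [pvDfs] at hu ⊢
      simp only [hv] at hu ⊢
      refine ih ?_ u x hu hux
      intro u' x' hu' hux'
      rw [PySem.Set.mem_add] at hu'
      rcases hu' with hu' | rfl
      · rcases hinv u' x' hu' hux' with h | h
        · exact Or.inl (by rw [PySem.Set.mem_add]; exact Or.inl h)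
        · rcases List.mem_cons.mp h with rfl | h
          · exact Or.inl (by rw [PySem.Set.mem_add]; exact Or.inr rfl)
          · exact Or.inr (List.mem_append.mpr (Or.inr h))
      · exact Or.inr (List.mem_append.mpr (Or.inl (List.mem_reverse.mpr hux')))

theorem pvDfs_sound (adj : List (List Int)) (seen : PySem.Set Int) (stack : List Int)
    (hs : ∀ x ∈ stack, x ∈ (0 : Int) :: adj.flatten) (P : Int → Prop)
    (h1 : ∀ x ∈ seen, P x) (h2 : ∀ x ∈ stack, P x)
    (h3 : ∀ u x : Int, P u → pvN adj u x → P x) :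
    ∀ x ∈ pvDfs adj seen stack hs, P x := by
  induction seen, stack, hs using pvDfs.induct adj with
  | case1 seen hs =>
      intro x hx
      rw [pvDfs] at hx
      exact h1 x hx
  | case2 seen v rest hs hv harg ih =>
      intro x hx
      rw [pvDfs] at hx
      simp only [hv, dif_pos] at hx
      exact ih h1 (fun y hy => h2 y (List.mem_cons_of_mem _ hy)) x hx
  | case3 seen v rest hs hv harg ih =>
      intro x hx
      rw [pvDfs] at hx
      simp only [hv] at hx
      have hPv : P v := h2 v (List.mem_cons_self)
      refine ih ?_ ?_ x hx
      · intro y hy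
        rw [PySem.Set.mem_add] at hy
        rcases hy with hy | rfl
        · exact h1 y hy
        · exact hPv
      · intro y hy
        rcases List.mem_append.mp hy with hy | hy
        · exact h3 v y hPv (List.mem_reverse.mp hy)
        · exact h2 y (List.mem_cons_of_mem _ hy)

theorem pvDfs_nodup (adj : List (List Int)) (seen : PySem.Set Int) (stack : List Int)
    (hs : ∀ x ∈ stack, x ∈ (0 : Int) :: adj.flatten) (hn : seen.Nodup) :
    (pvDfs adj seen stack hs).Nodup := by
  induction seen, stack, hs using pvDfs.induct adj with
  | case1 seen hs => rw [pvDfs]; exact hn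
  | case2 seen v rest hs hv harg ih => rw [pvDfs]; simp only [hv, dif_pos]; exact ih hn
  | case3 seen v rest hs hv harg ih =>
      rw [pvDfs]; simp only [hv]
      exact ih (PySem.Set.nodup_add seen v hn)

theorem pvDfs_complete (adj : List (List Int))
    (x : Int) (hx : Relation.ReflTransGen (pvN adj) 0 x) :
    x ∈ pvDfs adj PySem.Set.empty [0] (by intro y hy; simp at hy; simp [hy]) := by
  induction hx with
  | refl => exact pvDfs_mono adj _ _ _ 0 (Or.inr (List.mem_cons_self))
  | tail hab hbc ih =>
      exact pvDfs_closed adj _ _ _ (fun u y hu _ => by simp at hu) _ _ ih hbc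

-- ---- reachability transfer between pvN (adjacency) and pvRel (edges) ----

theorem pvRel_range {n : Int} {edges : List (Int × Int)} (hInR : pvInR n edges)
    {u x : Int} (h : pvRel edges u x) : 0 ≤ x ∧ x < n ∧ 0 ≤ u ∧ u < n := by
  rcases h with h | h
  · have := hInR _ h; exact ⟨this.2.2.1, this.2.2.2, this.1, this.2.1⟩
  · have := hInR _ h; exact ⟨this.1, this.2.1, this.2.2.1, this.2.2.2⟩

theorem pvReach_range {n : Int} {edges : List (Int × Int)} (hInR : pvInR n edges)
    (hn : 0 < n) {x : Int} (h : pvReach edges x) : 0 ≤ x ∧ x < n := by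
  induction h with
  | refl => omega
  | tail hab hbc ih =>
      have := pvRel_range hInR hbc
      exact ⟨this.1, this.2.1⟩

theorem pv_rtg_iff (n : Int) (edges : List (Int × Int)) (hInR : pvInR n edges)
    (hn0 : 0 < n) (hn : n = (edges.length : Int)) (x : Int) :
    Relation.ReflTransGen (pvN (adjacency_list n edges)) 0 x ↔ pvReach edges x := by
  have hNiff : ∀ u y : Int, 0 ≤ u → u < n →
      (pvN (adjacency_list n edges) u y ↔ pvRel edges u y) := by
    intro u y hu0 hun
    have hlen := adjacency_length n edges hInR hn
    have hu' : u.toNat < n.toNat := by omega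
    unfold pvN
    rw [pv_pyGetD_toNat _ _ _ hu0 (by rw [hlen]; omega)]
    have := adjacency_mem n edges hInR hn u.toNat hu' y
    rw [this]
    have : ((u.toNat : Int)) = u := by omega
    rw [this]
  constructor
  · intro h
    have key : ∀ y : Int, Relation.ReflTransGen (pvN (adjacency_list n edges)) 0 y →
        pvReach edges y ∧ 0 ≤ y ∧ y < n := by
      intro y hy
      induction hy with
      | refl => exact ⟨Relation.ReflTransGen.refl, by omega, hn0⟩
      | tail hab hbc ih =>
          rename_i b c
          have hrel : pvRel edges b c := (hNiff b c ih.2.1 ih.2.2).mp hbc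
          have := pvRel_range hInR hrel
          exact ⟨Relation.ReflTransGen.tail ih.1 hrel, this.1, this.2.1⟩
    exact (key x h).1
  · intro h
    have key : ∀ y : Int, pvReach edges y →
        Relation.ReflTransGen (pvN (adjacency_list n edges)) 0 y ∧ 0 ≤ y ∧ y < n := by
      intro y hy
      induction hy with
      | refl => exact ⟨Relation.ReflTransGen.refl, by omega, hn0⟩
      | tail hab hbc ih =>
          rename_i b c
          have hN : pvN (adjacency_list n edges) b c := (hNiff b c ih.2.1 ih.2.2).mpr hbc
          have := pvRel_range hInR hbc
          exact ⟨Relation.ReflTransGen.tail ih.1 hN, this.1, this.2.1⟩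
    exact (key x h).1

-- ---- A's final value ----

theorem pvA_final (n : Int) (edges : List (Int × Int)) (hInR : pvInR n edges)
    (hn0 : 0 < n) (hn : n = (edges.length : Int))
    (hs0 : ∀ x ∈ ([0] : List Int), x ∈ (0 : Int) :: (adjacency_list n edges).flatten) :
    (((PySem.Set.len (pvDfs (adjacency_list n edges) PySem.Set.empty [0] hs0) : Int) == n) = true
      ↔ ∀ k : Nat, k < n.toNat → pvReach edges ↑k) := by
  set adj := adjacency_list n edges with hadj
  set R := pvDfs adj PySem.Set.empty [0] hs0 with hR
  have hnodup : R.Nodup := pvDfs_nodup adj _ _ _ List.nodup_nil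
  have hRTG : ∀ x ∈ R, Relation.ReflTransGen (pvN adj) 0 x := by
    refine pvDfs_sound adj _ _ hs0 (fun y => Relation.ReflTransGen (pvN adj) 0 y) ?_ ?_ ?_
    · intro x hx; simp at hx
    · intro x hx
      rcases List.mem_cons.mp hx with rfl | hx
      · exact Relation.ReflTransGen.refl
      · simp at hx
    · intro u x hu hux; exact Relation.ReflTransGen.tail hu hux
  have hRreach : ∀ x ∈ R, pvReach edges x := by
    intro x hx
    exact (pv_rtg_iff n edges hInR hn0 hn x).mp (hRTG x hx)
  have hRbounds : ∀ x ∈ R, 0 ≤ x ∧ x < n := by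
    intro x hx
    exact pvReach_range hInR hn0 (hRreach x hx)
  have hcomplete : ∀ x : Int, pvReach edges x → x ∈ R := by
    intro x hx
    exact pvDfs_complete adj x
      ((pv_rtg_iff n edges hInR hn0 hn x).mpr hx)
  have hRsubT : R ⊆ PySem.List.pyRange 0 n 1 := by
    intro x hx
    rw [PySem.List.mem_pyRange_one]
    have := hRbounds x hx
    omega
  have hTlen : (PySem.List.pyRange 0 n 1).length = n.toNat := by
    rw [PySem.List.length_pyRange_one]; omega
  have hlen_iff : (((PySem.Set.len R : Int)) == n) = true ↔ R.length = n.toNat := by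
    have : PySem.Set.len R = (R.length : Int) := rfl
    rw [this]
    simp
    omega
  rw [hlen_iff]
  constructor
  · intro hlen k hk
    have hperm : R.Perm (PySem.List.pyRange 0 n 1) :=
      (hnodup.subperm hRsubT).perm_of_length_le (by omega)
    have hkT : (↑k : Int) ∈ PySem.List.pyRange 0 n 1 := by
      rw [PySem.List.mem_pyRange_one]; omega
    exact hRreach _ (hperm.mem_iff.mpr hkT)
  · intro hreach
    have hTsubR : PySem.List.pyRange 0 n 1 ⊆ R := by
      intro x hx
      rw [PySem.List.mem_pyRange_one] at hx
      have hx' : x = ((x.toNat : Nat) : Int) := by omega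
      rw [hx']
      exact hcomplete _ (hreach x.toNat (by omega))
    have hperm : R.Perm (PySem.List.pyRange 0 n 1) :=
      (List.perm_ext_iff_of_nodup hnodup (PySem.List.nodup_pyRange_one 0 n)).mpr
        (fun a => ⟨fun h => hRsubT h, fun h => hTsubR h⟩)
    rw [hperm.length_eq, hTlen]

-- ---- B's propagation ----

theorem pvPass_fold_length (l : List (Int × Int)) :
    ∀ (st : List Bool × Bool),
      ((l.foldl (fun st e =>
        if PySem.List.pyGetD st.1 e.1 false ≠ PySem.List.pyGetD st.1 e.2 false then
          (PySem.List.pySetD (PySem.List.pySetD st.1 e.1 true) e.2 true, true)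
        else st) st).1.length = st.1.length) := by
  induction l with
  | nil => intro st; rfl
  | cons e t ih =>
      intro st
      rw [List.foldl_cons]
      split
      · rw [ih]; simp [PySem.List.length_pySetD]
      · rw [ih]

theorem pvPass_fold_flag (l : List (Int × Int)) :
    ∀ (st : List Bool × Bool), st.2 = true →
      ((l.foldl (fun st e =>
        if PySem.List.pyGetD st.1 e.1 false ≠ PySem.List.pyGetD st.1 e.2 false then
          (PySem.List.pySetD (PySem.List.pySetD st.1 e.1 true) e.2 true, true)
        else st) st).2 = true) := by
  induction l with
  | nil => intro st h; exact h
  | cons e t ih =>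
      intro st h
      rw [List.foldl_cons]
      split
      · exact ih _ rfl
      · exact ih _ h

theorem pv_getD_pySetD_true_mono (r : List Bool) (j : Int) (i : Nat)
    (h : r.getD i false = true) :
    (PySem.List.pySetD r j true).getD i false = true := by
  unfold PySem.List.pySetD PySem.List.pySet?
  cases hk : PySem.List.pyIdx? r.length j with
  | none => simpa using h
  | some k =>
      simp only [Option.map_some, Option.getD_some]
      by_cases hi : i < r.length
      · rw [List.getD_eq_getElem _ _ (by simpa using hi), List.getElem_set]
        rw [List.getD_eq_getElem _ _ hi] at h
        split
        · rfl
        · exact h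
      · rw [List.getD_eq_default _ _ (by simpa using hi)] at h
        exact absurd h (by simp)

theorem pvPass_fold_mono (l : List (Int × Int)) :
    ∀ (st : List Bool × Bool) (i : Nat), st.1.getD i false = true →
      ((l.foldl (fun st e =>
        if PySem.List.pyGetD st.1 e.1 false ≠ PySem.List.pyGetD st.1 e.2 false then
          (PySem.List.pySetD (PySem.List.pySetD st.1 e.1 true) e.2 true, true)
        else st) st).1.getD i false = true) := by
  induction l with
  | nil => intro st i h; exact h
  | cons e t ih =>
      intro st i h
      rw [List.foldl_cons]
      split
      · exact ih _ i (pv_getD_pySetD_true_mono _ _ _ (pv_getD_pySetD_true_mono _ _ _ h))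
      · exact ih _ i h

theorem pvPass_fold_unchanged (l : List (Int × Int)) :
    ∀ (st : List Bool × Bool),
      ((l.foldl (fun st e =>
        if PySem.List.pyGetD st.1 e.1 false ≠ PySem.List.pyGetD st.1 e.2 false then
          (PySem.List.pySetD (PySem.List.pySetD st.1 e.1 true) e.2 true, true)
        else st) st).2 = false) →
      ((l.foldl (fun st e =>
        if PySem.List.pyGetD st.1 e.1 false ≠ PySem.List.pyGetD st.1 e.2 false then
          (PySem.List.pySetD (PySem.List.pySetD st.1 e.1 true) e.2 true, true)
        else st) st).1 = st.1) ∧ st.2 = false ∧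
      (∀ e ∈ l, PySem.List.pyGetD st.1 e.1 false = PySem.List.pyGetD st.1 e.2 false) := by
  induction l with
  | nil => intro st h; exact ⟨rfl, h, by simp⟩
  | cons e t ih =>
      intro st h
      rw [List.foldl_cons] at h ⊢
      by_cases hc : PySem.List.pyGetD st.1 e.1 false ≠ PySem.List.pyGetD st.1 e.2 false
      · exfalso
        rw [if_pos hc] at h
        have := pvPass_fold_flag t (PySem.List.pySetD (PySem.List.pySetD st.1 e.1 true) e.2 true, true) rfl
        rw [h] at this
        simp at this
      · rw [if_neg hc] at h ⊢
        obtain ⟨h1, h2, h3⟩ := ih st h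
        refine ⟨h1, h2, ?_⟩
        intro e' he'
        rcases List.mem_cons.mp he' with rfl | he'
        · exact not_ne_iff.mp hc
        · exact h3 e' he'

-- a strict-filter counting helper
def pvFC (r : List Bool) : Nat :=
  ((List.range r.length).filter (fun i => !(r.getD i false))).length

theorem pv_filter_strict {L : List Nat} {p q : Nat → Bool}
    (hpq : ∀ i ∈ L, p i = true → q i = true) (w : Nat) (hw : w ∈ L)
    (hq : q w = true) (hp : p w = false) :
    (L.filter p).length < (L.filter q).length := by
  obtain ⟨l1, l2, rfl⟩ := List.append_of_mem hw
  have m1 : (l1.filter p).length ≤ (l1.filter q).length := by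
    rw [← List.countP_eq_length_filter, ← List.countP_eq_length_filter]
    exact List.countP_mono_left (fun a ha h => hpq a (by simp [ha]) h)
  have m2 : (l2.filter p).length ≤ (l2.filter q).length := by
    rw [← List.countP_eq_length_filter, ← List.countP_eq_length_filter]
    exact List.countP_mono_left (fun a ha h => hpq a (by simp [ha]) h)
  rw [List.filter_append, List.filter_append, List.filter_cons, List.filter_cons, hp, hq]
  simp only [Bool.false_eq_true, if_false, if_true, List.length_append, List.length_cons]
  omega

theorem pvFC_le_of_mono {r r' : List Bool} (hl : r'.length = r.length)
    (hm : ∀ i : Nat, r.getD i false = true → r'.getD i false = true) :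
    pvFC r' ≤ pvFC r := by
  unfold pvFC
  rw [hl]
  rw [← List.countP_eq_length_filter, ← List.countP_eq_length_filter]
  apply List.countP_mono_left
  intro i _ h
  simp only [Bool.not_eq_eq_eq_not, Bool.not_true] at h ⊢
  cases hri : r.getD i false
  · rfl
  · rw [hm i hri] at h; exact absurd h (by simp)

theorem pvFC_lt_of_mono {r r' : List Bool} (hl : r'.length = r.length)
    (hm : ∀ i : Nat, r.getD i false = true → r'.getD i false = true)
    (w : Nat) (hwlt : w < r.length) (hw : r.getD w false = false)
    (hw' : r'.getD w false = true) : pvFC r' < pvFC r := by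
  unfold pvFC
  rw [hl]
  apply pv_filter_strict (q := fun i => !(r.getD i false)) ?_ w (by simpa using hwlt)
    (by simp only [hw, Bool.not_false]) (by simp only [hw', Bool.not_true])
  intro i _ h
  simp only [Bool.not_eq_eq_eq_not, Bool.not_true] at h ⊢
  cases hri : r.getD i false
  · rfl
  · rw [hm i hri] at h; exact absurd h (by simp)

theorem pv_getD_pySetD_self (r : List Bool) (j : Int) (h0 : 0 ≤ j)
    (h1 : j < (r.length : Int)) :
    (PySem.List.pySetD r j true).getD j.toNat false = true := by
  rw [PySem.List.pySetD_of_nonneg r true h0]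
  rw [List.getD_eq_getElem _ _ (by simp; omega), List.getElem_set]
  simp

theorem pv_getD_set_cases (r : List Bool) (j : Int) (i : Nat) (h0 : 0 ≤ j)
    (h : (PySem.List.pySetD r j true).getD i false = true) :
    (i = j.toNat ∧ i < r.length) ∨ r.getD i false = true := by
  rw [PySem.List.pySetD_of_nonneg r true h0] at h
  by_cases hi : i < r.length
  · rw [List.getD_eq_getElem _ _ (by simpa using hi), List.getElem_set] at h
    by_cases hij : j.toNat = i
    · exact Or.inl ⟨hij.symm, hi⟩
    · rw [if_neg hij] at h
      exact Or.inr (by rw [List.getD_eq_getElem _ _ hi]; exact h)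
  · rw [List.getD_eq_default _ _ (by simpa using hi)] at h
    exact absurd h (by simp)

theorem pvPass_fold_progress (n : Int) (edges : List (Int × Int)) (hInR : pvInR n edges)
    (l : List (Int × Int)) (hsub : l ⊆ edges) :
    ∀ (st : List Bool × Bool), st.1.length = n.toNat → st.2 = false →
      ((l.foldl (fun st e =>
        if PySem.List.pyGetD st.1 e.1 false ≠ PySem.List.pyGetD st.1 e.2 false then
          (PySem.List.pySetD (PySem.List.pySetD st.1 e.1 true) e.2 true, true)
        else st) st).2 = true) →
      pvFC (l.foldl (fun st e =>
        if PySem.List.pyGetD st.1 e.1 false ≠ PySem.List.pyGetD st.1 e.2 false then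
          (PySem.List.pySetD (PySem.List.pySetD st.1 e.1 true) e.2 true, true)
        else st) st).1 < pvFC st.1 := by
  induction l with
  | nil =>
      intro st _ h2 h3
      rw [List.foldl_nil] at h3
      rw [h2] at h3
      exact absurd h3 (by simp)
  | cons e t ih =>
      intro st hlen h2 h3
      have he := hsub (List.mem_cons_self)
      have hb := hInR e he
      rw [List.foldl_cons] at h3 ⊢
      by_cases hc : PySem.List.pyGetD st.1 e.1 false ≠ PySem.List.pyGetD st.1 e.2 false
      · rw [if_pos hc] at h3 ⊢
        set r2 := PySem.List.pySetD (PySem.List.pySetD st.1 e.1 true) e.2 true with hr2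
        have hlen2 : r2.length = st.1.length := by
          rw [hr2, PySem.List.length_pySetD, PySem.List.length_pySetD]
        have hstep : pvFC r2 < pvFC st.1 := by
          have h1' : e.1 < (st.1.length : Int) := by rw [hlen]; omega
          have h2' : e.2 < (st.1.length : Int) := by rw [hlen]; omega
          have hg1 := pv_pyGetD_toNat st.1 e.1 false hb.1 h1'
          have hg2 := pv_pyGetD_toNat st.1 e.2 false hb.2.2.1 h2'
          rw [hg1, hg2] at hc
          have hmono2 : ∀ i : Nat, st.1.getD i false = true → r2.getD i false = true :=
            fun i h => pv_getD_pySetD_true_mono _ _ _ (pv_getD_pySetD_true_mono _ _ _ h)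
          by_cases hd1 : st.1.getD e.1.toNat false = true
          · have hd2 : st.1.getD e.2.toNat false = false := by
              cases h2x : st.1.getD e.2.toNat false
              · rfl
              · rw [hd1, h2x] at hc; exact absurd rfl hc
            refine pvFC_lt_of_mono hlen2 hmono2 e.2.toNat (by omega) hd2 ?_
            rw [hr2]
            apply pv_getD_pySetD_self _ _ hb.2.2.1
            rw [PySem.List.length_pySetD]
            exact h2'
          · have hd1' : st.1.getD e.1.toNat false = false := by
              cases h1x : st.1.getD e.1.toNat false
              · rfl
              · exact absurd h1x hd1
            refine pvFC_lt_of_mono hlen2 hmono2 e.1.toNat (by omega) hd1' ?_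
            rw [hr2]
            apply pv_getD_pySetD_true_mono
            apply pv_getD_pySetD_self _ _ hb.1 h1'
        have hfin_len := pvPass_fold_length t (r2, true)
        calc pvFC (t.foldl _ (r2, true)).1 ≤ pvFC r2 :=
              pvFC_le_of_mono hfin_len (fun i h => pvPass_fold_mono t (r2, true) i h)
          _ < pvFC st.1 := hstep
      · rw [if_neg hc] at h3 ⊢
        exact ih (fun e' he' => hsub (List.mem_cons_of_mem _ he')) st hlen h2 h3

def pvGood (n : Int) (edges : List (Int × Int)) (r : List Bool) : Prop :=
  ∀ i : Nat, i < n.toNat → r.getD i false = true → pvReach edges ↑i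

theorem pvPass_fold_good (n : Int) (edges : List (Int × Int)) (hInR : pvInR n edges)
    (l : List (Int × Int)) (hsub : l ⊆ edges) :
    ∀ (st : List Bool × Bool), st.1.length = n.toNat → pvGood n edges st.1 →
      pvGood n edges (l.foldl (fun st e =>
        if PySem.List.pyGetD st.1 e.1 false ≠ PySem.List.pyGetD st.1 e.2 false then
          (PySem.List.pySetD (PySem.List.pySetD st.1 e.1 true) e.2 true, true)
        else st) st).1 := by
  induction l with
  | nil => intro st _ hg; exact hg
  | cons e t ih =>
      intro st hlen hg
      have he := hsub (List.mem_cons_self)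
      have hb := hInR e he
      rw [List.foldl_cons]
      by_cases hc : PySem.List.pyGetD st.1 e.1 false ≠ PySem.List.pyGetD st.1 e.2 false
      · rw [if_pos hc]
        set r2 := PySem.List.pySetD (PySem.List.pySetD st.1 e.1 true) e.2 true with hr2
        have hlen2 : r2.length = n.toNat := by
          rw [hr2, PySem.List.length_pySetD, PySem.List.length_pySetD, hlen]
        have h1' : e.1 < (st.1.length : Int) := by rw [hlen]; omega
        have h2' : e.2 < (st.1.length : Int) := by rw [hlen]; omega
        have hg1 := pv_pyGetD_toNat st.1 e.1 false hb.1 h1'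
        have hg2 := pv_pyGetD_toNat st.1 e.2 false hb.2.2.1 h2'
        rw [hg1, hg2] at hc
        have hrel : pvRel edges e.1 e.2 := Or.inl (by simpa using he)
        have hcast1 : ((e.1.toNat : Nat) : Int) = e.1 := by omega
        have hcast2 : ((e.2.toNat : Nat) : Int) = e.2 := by omega
        have hreach : pvReach edges e.1 ∧ pvReach edges e.2 := by
          by_cases hd1 : st.1.getD e.1.toNat false = true
          · have hre1 : pvReach edges e.1 := by
              have := hg e.1.toNat (by omega) hd1
              rwa [hcast1] at this
            exact ⟨hre1, Relation.ReflTransGen.tail hre1 hrel⟩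
          · have hd2 : st.1.getD e.2.toNat false = true := by
              cases h2x : st.1.getD e.2.toNat false
              · cases h1x : st.1.getD e.1.toNat false
                · rw [h1x, h2x] at hc; exact absurd rfl hc
                · exact absurd h1x hd1
              · rfl
            have hre2 : pvReach edges e.2 := by
              have := hg e.2.toNat (by omega) hd2
              rwa [hcast2] at this
            exact ⟨Relation.ReflTransGen.tail hre2 (Or.inr (by simpa using he)), hre2⟩
        refine ih (fun e' he' => hsub (List.mem_cons_of_mem _ he')) (r2, true) hlen2 ?_
        intro i hi hri
        rcases pv_getD_set_cases _ e.2 i hb.2.2.1 hri with ⟨rfl, _⟩ | hri2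
        · rw [hcast2]; exact hreach.2
        · rcases pv_getD_set_cases _ e.1 i hb.1 hri2 with ⟨rfl, _⟩ | hri1
          · rw [hcast1]; exact hreach.1
          · exact hg i hi hri1
      · rw [if_neg hc]
        exact ih (fun e' he' => hsub (List.mem_cons_of_mem _ he')) st hlen hg

theorem pvProp_spec (n : Int) (edges : List (Int × Int)) (hInR : pvInR n edges) :
    ∀ (fuel : Nat) (r : List Bool), r.length = n.toNat → pvFC r < fuel →
      (pvProp edges r fuel).length = n.toNat ∧
      (∀ i : Nat, r.getD i false = true → (pvProp edges r fuel).getD i false = true) ∧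
      (pvGood n edges r → pvGood n edges (pvProp edges r fuel)) ∧
      (∀ e ∈ edges, PySem.List.pyGetD (pvProp edges r fuel) e.1 false
        = PySem.List.pyGetD (pvProp edges r fuel) e.2 false) := by
  intro fuel
  induction fuel with
  | zero => intro r _ hfc; omega
  | succ fuel ih =>
      intro r hlen hfc
      rw [pvProp]
      unfold pvPass
      cases hflag : (List.foldl
          (fun st e =>
            if PySem.List.pyGetD st.1 e.1 false ≠ PySem.List.pyGetD st.1 e.2 false then
              (PySem.List.pySetD (PySem.List.pySetD st.1 e.1 true) e.2 true, true)
            else st)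
          (r, false) edges).2
      · simp only [hflag, if_neg (by simp : ¬ (false = true))]
        obtain ⟨heq, _, hstab⟩ := pvPass_fold_unchanged edges (r, false) hflag
        rw [heq]
        exact ⟨hlen, fun i h => h, fun h => h, fun e he => hstab e he⟩
      · simp only [hflag, if_pos rfl]
        have hlen1 := pvPass_fold_length edges (r, false)
        have hprog : pvFC (List.foldl
            (fun st e =>
              if PySem.List.pyGetD st.1 e.1 false ≠ PySem.List.pyGetD st.1 e.2 false then
                (PySem.List.pySetD (PySem.List.pySetD st.1 e.1 true) e.2 true, true)
              else st)
            (r, false) edges).1 < pvFC r :=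
          pvPass_fold_progress n edges hInR edges (fun _ h => h) (r, false) hlen rfl hflag
        obtain ⟨q1, q2, q3, q4⟩ := ih _ (by rw [hlen1]; exact hlen) (by omega)
        refine ⟨q1, ?_, ?_, q4⟩
        · intro i h
          exact q2 i (pvPass_fold_mono edges (r, false) i h)
        · intro hg
          exact q3 (pvPass_fold_good n edges hInR edges (fun _ h => h) (r, false) hlen hg)

theorem pvB_final (n : Int) (edges : List (Int × Int)) (hInR : pvInR n edges)
    (hn0 : 0 < n) (hn : n = (edges.length : Int)) :
    ((pvProp edges (PySem.List.pySetD (List.replicate n.toNat false) 0 true) (n.toNat + 1)).all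
        (fun b => b) = true
      ↔ ∀ k : Nat, k < n.toNat → pvReach edges ↑k) := by
  set r0 := PySem.List.pySetD (List.replicate n.toNat false) 0 true with hr0
  have hlen0 : r0.length = n.toNat := by
    rw [hr0, PySem.List.length_pySetD, List.length_replicate]
  have hget0 : r0.getD 0 false = true := by
    have := pv_getD_pySetD_self (List.replicate n.toNat false) 0 (by omega)
      (by simp; omega)
    simpa using this
  have hgood0 : pvGood n edges r0 := by
    intro i hi hri
    rcases pv_getD_set_cases _ 0 i (by omega) hri with ⟨rfl, _⟩ | hri2
    · exact Relation.ReflTransGen.refl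
    · rw [List.getD_eq_getElem _ _ (by simpa using hi)] at hri2
      simp at hri2
  have hfc0 : pvFC r0 < n.toNat + 1 := by
    have := List.length_filter_le (fun i => !(r0.getD i false)) (List.range r0.length)
    unfold pvFC
    simp only [List.length_range] at this
    omega
  obtain ⟨q1, q2, q3, q4⟩ := pvProp_spec n edges hInR (n.toNat + 1) r0 hlen0 hfc0
  set rr := pvProp edges r0 (n.toNat + 1) with hrr
  have hall : (rr.all (fun b => b) = true) ↔ ∀ i : Nat, i < n.toNat → rr.getD i false = true := by
    rw [List.all_eq_true]
    constructor
    · intro h i hi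
      rw [List.getD_eq_getElem _ _ (by omega)]
      exact h _ (List.getElem_mem _)
    · intro h b hb
      obtain ⟨i, hi, rfl⟩ := List.mem_iff_getElem.mp hb
      rw [← List.getD_eq_getElem _ false (by omega)]
      exact h i (by omega)
  rw [hall]
  constructor
  · intro h k hk
    exact q3 hgood0 k hk (h k hk)
  · intro h i hi
    have key : ∀ x : Int, pvReach edges x → rr.getD x.toNat false = true := by
      intro x hx
      induction hx with
      | refl => exact q2 0 hget0
      | tail hab hbc ihx =>
          rename_i b c
          have hbb := pvRel_range hInR hbc
          obtain ⟨e, he, hec⟩ : ∃ e ∈ edges, (e.1 = b ∧ e.2 = c) ∨ (e.1 = c ∧ e.2 = b) := by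
            rcases hbc with hm | hm
            · exact ⟨(b, c), hm, Or.inl ⟨rfl, rfl⟩⟩
            · exact ⟨(c, b), hm, Or.inr ⟨rfl, rfl⟩⟩
          have hbnd := hInR e he
          have hq := q4 e he
          rw [pv_pyGetD_toNat rr e.1 false hbnd.1 (by rw [q1]; omega),
            pv_pyGetD_toNat rr e.2 false hbnd.2.2.1 (by rw [q1]; omega)] at hq
          rcases hec with ⟨h1, h2⟩ | ⟨h1, h2⟩
          · rw [← h2, ← hq, h1]; exact ihx
          · rw [← h1, hq, h2]; exact ihx
    have := key ↑i (h i hi)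
    simpa using this

-- ---- degrees guard ----

theorem pvIncAt_map_len (acc : List (List Int)) (i x : Int)
    (h0 : 0 ≤ i) (h1 : i < (acc.length : Int)) :
    pvIncAt (acc.map (fun l => (l.length : Int))) i
      = (pvAppendAt acc i x).map (fun l => (l.length : Int)) := by
  unfold pvIncAt pvAppendAt
  rw [PySem.List.pyGet?_eq_some_getElem acc h0 h1]
  rw [PySem.List.pyGet?_eq_some_getElem (acc.map (fun l => (l.length : Int))) h0
    (by simpa using h1)]
  simp only [List.getElem_map]
  rw [PySem.List.pySetD_of_nonneg _ _ h0, PySem.List.pySetD_of_nonneg _ _ h0]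
  rw [List.map_set]
  congr 1
  simp

theorem pvDegrees_eq (n : Int) (edges : List (Int × Int)) (hInR : pvInR n edges)
    (hn : n = (edges.length : Int)) :
    pvDegrees n edges = (adjacency_list n edges).map (fun l => (l.length : Int)) := by
  have h0 : (0:Int) ≤ n := by rw [hn]; positivity
  have H : ∀ (l : List (Int × Int)) (acc : List (List Int)),
      (∀ e ∈ l, 0 ≤ e.1 ∧ e.1 < (acc.length : Int) ∧ 0 ≤ e.2 ∧ e.2 < (acc.length : Int)) →
      l.foldl (fun d e => pvIncAt (pvIncAt d e.1) e.2) (acc.map (fun l => (l.length : Int)))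
        = (l.foldl (fun adj e => pvAppendAt (pvAppendAt adj e.1 e.2) e.2 e.1) acc).map
            (fun l => (l.length : Int)) := by
    intro l
    induction l with
    | nil => intro acc _; simp
    | cons e t ih =>
        intro acc h
        have he := h e (List.mem_cons_self)
        rw [List.foldl_cons, List.foldl_cons]
        rw [pvIncAt_map_len acc e.1 e.2 he.1 he.2.1]
        rw [pvIncAt_map_len _ e.2 e.1 he.2.2.1 (by rw [pvAppendAt_length]; exact he.2.2.2)]
        apply ih
        intro e' he'
        rw [pvAppendAt_length, pvAppendAt_length]
        exact h e' (List.mem_cons_of_mem _ he')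
  have hrep : (List.replicate n.toNat ([] : List Int)).map (fun l => (l.length : Int))
      = List.replicate n.toNat (0 : Int) := by simp
  unfold pvDegrees adjacency_list
  rw [← hrep]
  apply H
  intro e he
  have := hInR e he
  simp only [List.length_replicate]
  constructor
  · exact this.1
  constructor
  · have : e.1 < n := this.2.1
    omega
  constructor
  · exact this.2.2.1
  · have : e.2 < n := this.2.2.2
    omega

theorem pvGuard_eq (n : Int) (edges : List (Int × Int)) (hInR : pvInR n edges)
    (hn : n = (edges.length : Int)) :
    ((PySem.List.pyRange 0 n 1).all
        (fun v => (PySem.List.pyGetD (adjacency_list n edges) v []).length == 2))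
      = ((pvDegrees n edges).all (fun d => d == 2)) := by
  have h0 : (0:Int) ≤ n := by rw [hn]; positivity
  have hlen := adjacency_length n edges hInR hn
  set adj := adjacency_list n edges with hadj
  rw [pvDegrees_eq n edges hInR hn, ← hadj]
  rw [Bool.eq_iff_iff, List.all_eq_true, List.all_eq_true]
  constructor
  · intro h d hd
    obtain ⟨l, hl, rfl⟩ := List.mem_map.mp hd
    obtain ⟨k, hk, rfl⟩ := List.mem_iff_getElem.mp hl
    have hkmem : ((k : Int)) ∈ PySem.List.pyRange 0 n 1 := by
      rw [PySem.List.mem_pyRange_one]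
      constructor
      · positivity
      · omega
    have := h _ hkmem
    simp only [PySem.List.pyGetD_natCast] at this
    rw [List.getD_eq_getElem _ _ hk] at this
    simp only [beq_iff_eq] at this ⊢
    omega
  · intro h v hv
    rw [PySem.List.mem_pyRange_one] at hv
    rw [pv_pyGetD_toNat adj v [] hv.1 (by rw [hlen]; omega)]
    have hvk : v.toNat < adj.length := by omega
    have hmem : ((adj[v.toNat]'hvk).length : Int)
        ∈ adj.map (fun l => (l.length : Int)) :=
      List.mem_map.mpr ⟨_, List.getElem_mem hvk, rfl⟩
    have := h _ hmem
    rw [List.getD_eq_getElem _ _ hvk]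
    simp only [beq_iff_eq] at this ⊢
    omega

theorem single_tour_check_spec_aux :
  ∀ (n : Int) (edges : List (Int × Int)),
    Pre_single_tour_check n edges →
    single_tour_check n edges = single_tour_check_alt n edges := by
  intro n edges hpre
  unfold Pre_single_tour_check at hpre
  unfold single_tour_check single_tour_check_alt
  by_cases hlen : (edges.length : Int) = n
  · obtain ⟨hn0, hB⟩ := hpre hlen
    have hInR : pvInR n edges := hB
    rw [if_neg (show ¬ ((edges.length : Int) ≠ n) from fun h => h hlen),
      if_neg (show ¬ ((edges.length : Int) ≠ n) from fun h => h hlen)]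
    dsimp only
    rw [pvGuard_eq n edges hInR hlen.symm]
    by_cases hg : (pvDegrees n edges).all (fun d => d == 2)
    · rw [if_neg (by simp [hg]), if_neg (by simp [hg])]
      rw [Bool.eq_iff_iff]
      rw [pvA_final n edges hInR hn0 hlen.symm _]
      rw [pvB_final n edges hInR hn0 hlen.symm]
    · rw [if_pos (by simp [hg]), if_pos (by simp [hg])]
  · rw [if_pos (show (edges.length : Int) ≠ n from hlen),
      if_pos (show (edges.length : Int) ≠ n from hlen)]

-- ===== VERDICT (by name: the statement is the Claim_ definition above) =====
theorem single_tour_check_spec : Claim_equal_single_tour_check := by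
  intro n edges _ hpre
  exact single_tour_check_spec_aux n edges hpre
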